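-- pv_equiv track=rewrite | github.com/sdrasco/freedact | src/redactor/pseudo/case_preserver.py | apply_letter_punct_profile
-- ===== SOURCE A (Python) =====
-- from typing import List, Optional, Sequence, Tuple
--
-- def apply_letter_punct_profile(replacement_core: str, profile: Sequence[Tuple[int, str]]) -> str:
--     """Insert punctuation defined by ``profile`` into ``replacement_core``.
--
--     ``profile`` is typically produced by :func:`letter_punct_profile` and
--     contains pairs of ``(letter_offset, punct)``.  ``letter_offset`` counts only
--     alphabetic characters.  If an offset exceeds the number of available
--     letters the punctuation is appended at the end.
--     """
--
--     if not profile: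
--         return replacement_core
--
--     result: List[str] = []
--     letters_seen = 0
--     prof_iter = iter(sorted(profile, key=lambda x: x[0]))
--     current = next(prof_iter, None)
--
--     for ch in replacement_core:
--         while current and letters_seen == current[0]:
--             result.append(current[1])
--             current = next(prof_iter, None)
--         result.append(ch)
--         if ch.isalpha():
--             letters_seen += 1
--
--     while current:
--         result.append(current[1])
--         current = next(prof_iter, None)
--     return "".join(result)
-- ===== SOURCE B (Python) =====
-- def apply_letter_punct_profile(replacement_core, profile):
--     """Insert punctuation defined by ``profile`` into ``replacement_core``.
--
--     Two-phase rebuild: precompute, for every prefix-letter count, the first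
--     string index where it occurs; consume the sorted profile in order,
--     resolving each entry to its insertion index — from the first entry with
--     no insertion point on, everything goes to the end; then assemble the
--     string, emitting each placed entry's punctuation before its index.
--     """
--     if not profile:
--         return replacement_core
--
--     s = replacement_core
--     first_at = {}
--     c = 0
--     for i, ch in enumerate(s):
--         first_at.setdefault(c, i)
--         if ch.isalpha():
--             c += 1
--
--     placed = []
--     tail = []
--     blocked = False
--     for o, p in sorted(profile, key=lambda x: x[0]):
--         if blocked or o not in first_at:
--             blocked = True
--             tail.append(p)
--         else:
--             placed.append((first_at[o], p))
--
--     out = []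
--     for i, ch in enumerate(s):
--         for j, p in placed:
--             if j == i:
--                 out.append(p)
--         out.append(ch)
--     out.extend(tail)
--     return "".join(out)
-- ===== Notes on version B (the rewrite author's own statement) =====
-- stated objective: alternative
-- what changed: A stream-merges the sorted profile while scanning the string (an iterator advanced by a while-loop inside the character loop); B first precomputes the first string index for every prefix-letter count, resolves each sorted profile entry to its insertion index (or to the end from the first unplaceable entry on), and then assembles the output per index in a separate pass.
import Mathlib
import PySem

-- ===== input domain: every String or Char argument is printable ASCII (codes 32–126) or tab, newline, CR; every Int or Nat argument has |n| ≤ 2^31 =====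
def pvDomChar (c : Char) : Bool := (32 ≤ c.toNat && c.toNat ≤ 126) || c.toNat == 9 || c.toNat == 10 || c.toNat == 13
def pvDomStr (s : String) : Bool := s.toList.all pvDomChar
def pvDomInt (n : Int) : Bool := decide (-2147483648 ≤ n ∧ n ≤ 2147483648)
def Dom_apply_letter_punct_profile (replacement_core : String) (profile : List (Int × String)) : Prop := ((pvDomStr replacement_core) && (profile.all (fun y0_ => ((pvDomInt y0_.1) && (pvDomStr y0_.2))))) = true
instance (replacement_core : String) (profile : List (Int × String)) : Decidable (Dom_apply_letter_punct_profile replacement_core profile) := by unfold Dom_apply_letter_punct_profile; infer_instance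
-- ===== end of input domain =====

-- B replaces A's stream-merge (iterator advanced inside the character loop) by a two-phase
-- rebuild: precompute the first index of every prefix-letter count, resolve the sorted profile
-- entries to insertion indices (unplaceable suffix goes to the end), then assemble per index.


-- ===== PORT A =====
-- the inner `while current and letters_seen == current[0]` loop: pops the leading profile
-- entries whose offset equals letters_seen, returning their puncts and the rest of the iterator
def pvA_while (n : Int) : List (Int × String) → List String × List (Int × String)
  | [] => ([], [])
  | (o, p) :: rest =>
    if o = n then
      let r := pvA_while n rest
      (p :: r.1, r.2)
    else ([], (o, p) :: rest)

-- the `for ch in replacement_core` loop (state: letters_seen, remaining profile iterator),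
-- followed by the trailing `while current` loop (the final `rem.map`)
def pvA_loop : List Char → Int → List (Int × String) → List String
  | [], _, rem => rem.map (·.2)
  | ch :: rest, n, rem =>
    let e := pvA_while n rem
    e.1 ++ [String.ofList [ch]] ++ pvA_loop rest (n + (if PySem.Str.isalpha ch then 1 else 0)) e.2

def apply_letter_punct_profile (replacement_core : String) (profile : List (Int × String)) : String :=
  if profile = [] then replacement_core
  else
    PySem.Str.join "" (pvA_loop replacement_core.toList 0 (PySem.List.sorted profile (fun x => x.1) false))

-- ===== PORT B =====
def apply_letter_punct_profile_alt (replacement_core : String) (profile : List (Int × String)) : String :=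
  if profile = [] then replacement_core
  else
    let s := replacement_core.toList
    -- first_at/c loop: for i, ch in enumerate(s): first_at.setdefault(c, i); if ch.isalpha(): c += 1
    let fa := ((PySem.List.enumerate s 0).foldl
      (fun (st : PySem.Dict Int Int × Int) ic =>
        (st.1.setdefault st.2 ic.1, st.2 + (if PySem.Str.isalpha ic.2 then 1 else 0)))
      (PySem.Dict.empty, 0)).1
    -- placed/tail/blocked loop over the sorted profile
    let pt := (PySem.List.sorted profile (fun x => x.1) false).foldl
      (fun (st : List (Int × String) × List String × Bool) op =>
        if st.2.2 || !(fa.contains op.1) then (st.1, st.2.1 ++ [op.2], true)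
        -- first_at[op.0]: KeyError impossible, membership was just checked; total read via getD
        else (st.1 ++ [((fa.get? op.1).getD 0, op.2)], st.2.1, st.2.2))
      ([], [], false)
    -- assembly: for i, ch in enumerate(s): (for j, p in placed: if j == i: append p); append ch
    let out := (PySem.List.enumerate s 0).foldl
      (fun acc ic =>
        (pt.1.foldl (fun a q => if q.1 == ic.1 then a ++ [q.2] else a) acc) ++ [String.ofList [ic.2]])
      []
    PySem.Str.join "" (out ++ pt.2.1)

-- ===== PRECONDITION & SPEC =====
def Spec_apply_letter_punct_profile (replacement_core : String) (profile : List (Int × String)) (out : String) : Prop := out = apply_letter_punct_profile_alt replacement_core profile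
instance (replacement_core : String) (profile : List (Int × String)) (out : String) : Decidable (Spec_apply_letter_punct_profile replacement_core profile out) := by unfold Spec_apply_letter_punct_profile; infer_instance

-- ===== CLAIM (what is proved, stated in full; the proofs are below) =====
def Claim_equal_apply_letter_punct_profile : Prop := ∀ (replacement_core : String) (profile : List (Int × String)), Dom_apply_letter_punct_profile replacement_core profile → Spec_apply_letter_punct_profile replacement_core profile (apply_letter_punct_profile replacement_core profile)

-- ===== LEMMAS AND PROOFS =====

-- first index i of s at which the running letter count (started at 0) equals o; none if never
def faIdx : List Char → Int → Option Int
  | [], _ => none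
  | c :: cs, o =>
    if o = 0 then some 0
    else (faIdx cs (o - (if PySem.Str.isalpha c then 1 else 0))).map (· + 1)

-- B's reference assembly: before the i-th char emit the placed puncts whose index is i
def pvAsm : List Char → List (Int × String) → List String
  | [], _ => []
  | c :: cs, placed =>
    (placed.filter (fun q => q.1 == 0)).map (·.2) ++ [String.ofList [c]]
      ++ pvAsm cs (placed.map (fun q => (q.1 - 1, q.2)))

theorem faIdx_neg (s : List Char) (o : Int) (ho : o < 0) : faIdx s o = none := by
  induction s generalizing o with
  | nil => rfl
  | cons c cs ih =>
    simp only [faIdx]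
    rw [if_neg (by omega), ih _ (by split <;> omega)]
    rfl

theorem pvA_while_spec (n : Int) (rem : List (Int × String)) :
    pvA_while n rem = ((rem.takeWhile (fun p => p.1 == n)).map (·.2), rem.dropWhile (fun p => p.1 == n)) := by
  induction rem with
  | nil => rfl
  | cons hd tl ih =>
    obtain ⟨o, p⟩ := hd
    by_cases h : o = n
    · simp [pvA_while, h, ih]
    · simp [pvA_while, h]

-- blocked: if the head of the remaining profile can never be placed, nothing is ever inserted
theorem pvA_loop_blocked (s : List Char) (n : Int) (o : Int) (p : String) (rest : List (Int × String))
    (h : faIdx s (o - n) = none) :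
    pvA_loop s n ((o, p) :: rest) = s.map (fun c => String.ofList [c]) ++ ((o, p) :: rest).map (·.2) := by
  induction s generalizing n with
  | nil => rfl
  | cons c cs ih =>
    have hon : o ≠ n := by
      intro he
      rw [faIdx] at h
      simp [he] at h
    rw [faIdx, if_neg (by omega), Option.map_eq_none_iff] at h
    simp only [pvA_loop, pvA_while, if_neg hon]
    rw [ih _ (by rw [show o - (n + (if PySem.Str.isalpha c then 1 else 0)) = o - n - (if PySem.Str.isalpha c then 1 else 0) by ring]; exact h)]
    simp

theorem pvAsm_nil_placed (s : List Char) : pvAsm s [] = s.map (fun c => String.ofList [c]) := by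
  induction s with
  | nil => rfl
  | cons c cs ih => simp [pvAsm, ih]

theorem faIdx_nonneg (s : List Char) (o j : Int) (h : faIdx s o = some j) : 0 ≤ j := by
  induction s generalizing o j with
  | nil => simp [faIdx] at h
  | cons c cs ih =>
    rw [faIdx] at h
    split at h
    · simp at h
      omega
    · obtain ⟨j', hj', hj⟩ := Option.map_eq_some_iff.mp h
      have := ih _ _ hj'
      omega

theorem faIdx_cons_ne (c : Char) (cs : List Char) (o n : Int) (h : o ≠ n) :
    faIdx (c :: cs) (o - n)
      = (faIdx cs (o - (n + (if PySem.Str.isalpha c then 1 else 0)))).map (· + 1) := by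
  have harg : o - n - (if PySem.Str.isalpha c then 1 else 0)
      = o - (n + (if PySem.Str.isalpha c then 1 else 0)) := by ring
  rw [faIdx, if_neg (by omega), harg]

theorem takeWhile_congr_mem {α : Type} (l : List α) (p q : α → Bool) (h : ∀ x ∈ l, p x = q x) :
    l.takeWhile p = l.takeWhile q := by
  induction l with
  | nil => rfl
  | cons a t ih =>
    have ha := h a (by simp)
    by_cases hp : p a = true
    · rw [List.takeWhile_cons_of_pos hp, List.takeWhile_cons_of_pos (by rw [← ha]; exact hp),
        ih (fun x hx => h x (by simp [hx]))]
    · rw [List.takeWhile_cons_of_neg hp, List.takeWhile_cons_of_neg (by rw [← ha]; exact hp)]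

theorem dropWhile_congr_mem {α : Type} (l : List α) (p q : α → Bool) (h : ∀ x ∈ l, p x = q x) :
    l.dropWhile p = l.dropWhile q := by
  induction l with
  | nil => rfl
  | cons a t ih =>
    have ha := h a (by simp)
    by_cases hp : p a = true
    · rw [List.dropWhile_cons_of_pos hp, List.dropWhile_cons_of_pos (by rw [← ha]; exact hp),
        ih (fun x hx => h x (by simp [hx]))]
    · rw [List.dropWhile_cons_of_neg hp, List.dropWhile_cons_of_neg (by rw [← ha]; exact hp)]

-- placed entries whose index is already negative are never emitted by pvAsm
theorem pvAsm_neg_prefix (s : List Char) (l1 l2 : List (Int × String))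
    (h : ∀ q ∈ l1, q.1 < 0) : pvAsm s (l1 ++ l2) = pvAsm s l2 := by
  induction s generalizing l1 l2 with
  | nil => rfl
  | cons c cs ih =>
    have h1 : l1.filter (fun q => q.1 == 0) = [] := by
      rw [List.filter_eq_nil_iff]
      intro q hq
      have := h q hq
      simp
      omega
    have h2 := ih (l1.map (fun q => (q.1 - 1, q.2))) (l2.map (fun q => (q.1 - 1, q.2))) (by
      intro q hq
      obtain ⟨x, hx, rfl⟩ := List.mem_map.mp hq
      have := h x hx
      simp
      omega)
    simp only [pvAsm, List.filter_append, List.map_append, h1, List.nil_append]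
    rw [h2]

-- splitting B's resolved profile at one character step of A's merge (sorted remainder)
theorem pvSplit (c : Char) (cs : List Char) (n : Int) (rem : List (Int × String))
    (hs : rem.Pairwise (fun a b => a.1 ≤ b.1)) :
    ((rem.takeWhile (fun p => (faIdx (c :: cs) (p.1 - n)).isSome)).map
        (fun p => ((faIdx (c :: cs) (p.1 - n)).getD 0, p.2))
      = (rem.takeWhile (fun p => p.1 == n)).map (fun p => ((0 : Int), p.2))
        ++ (((rem.dropWhile (fun p => p.1 == n)).takeWhile
            (fun p => (faIdx cs (p.1 - (n + (if PySem.Str.isalpha c then 1 else 0)))).isSome)).map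
            (fun p => ((faIdx cs (p.1 - (n + (if PySem.Str.isalpha c then 1 else 0)))).getD 0 + 1, p.2))))
    ∧ rem.dropWhile (fun p => (faIdx (c :: cs) (p.1 - n)).isSome)
      = (rem.dropWhile (fun p => p.1 == n)).dropWhile
          (fun p => (faIdx cs (p.1 - (n + (if PySem.Str.isalpha c then 1 else 0)))).isSome) := by
  induction rem with
  | nil => simp
  | cons hd tl ih =>
    obtain ⟨o, p⟩ := hd
    rw [List.pairwise_cons] at hs
    obtain ⟨ih1, ih2⟩ := ih hs.2
    by_cases ho : o = n
    · subst ho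
      have h0 : faIdx (c :: cs) 0 = some 0 := by
        rw [faIdx]
        simp
      constructor
      · simp only [List.takeWhile_cons, List.dropWhile_cons, show o - o = 0 by ring, h0]
        simp [ih1, h0]
      · simp only [List.dropWhile_cons, show o - o = 0 by ring, h0]
        simp [ih2]
    · have hbeq : (o == n) = false := by simp [ho]
      by_cases hP : (faIdx (c :: cs) (o - n)).isSome = true
      · -- head placeable but offset ≠ n, hence > n: no entry of the list equals n
        have hno : n < o := by
          by_contra hle
          rw [faIdx_neg _ _ (by omega)] at hP
          simp at hP
        have hmem : ∀ x ∈ (o, p) :: tl, x.1 ≠ n := by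
          intro x hx
          rcases List.mem_cons.mp hx with h | h
          · subst h; omega
          · have := hs.1 x h; omega
        have hpred : ∀ x ∈ tl,
            ((fun q : Int × String => (faIdx (c :: cs) (q.1 - n)).isSome) x)
              = ((fun q : Int × String => (faIdx cs (q.1 - (n + (if PySem.Str.isalpha c then 1 else 0)))).isSome) x) := by
          intro x hx
          dsimp only
          rw [faIdx_cons_ne _ _ _ _ (hmem x (by simp [hx]))]
          simp
        have hP' : (faIdx cs (o - (n + (if PySem.Str.isalpha c then 1 else 0)))).isSome = true := by
          rw [faIdx_cons_ne _ _ _ _ ho] at hP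
          simpa using hP
        have hmapeq : ∀ x ∈ tl.takeWhile (fun q : Int × String => (faIdx (c :: cs) (q.1 - n)).isSome),
            ((fun q : Int × String => ((faIdx (c :: cs) (q.1 - n)).getD 0, q.2)) x)
              = ((fun q : Int × String => ((faIdx cs (q.1 - (n + (if PySem.Str.isalpha c then 1 else 0)))).getD 0 + 1, q.2)) x) := by
          intro x hx
          have hxl : x ∈ tl := List.takeWhile_subset _ hx
          have hxP := List.mem_takeWhile_imp hx
          dsimp only at hxP ⊢
          rw [faIdx_cons_ne _ _ _ _ (hmem x (by simp [hxl]))] at hxP ⊢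
          cases hfa : faIdx cs (x.1 - (n + (if PySem.Str.isalpha c then 1 else 0))) with
          | none => rw [hfa] at hxP; simp at hxP
          | some j => simp
        constructor
        · obtain ⟨j, hj⟩ := Option.isSome_iff_exists.mp hP'
          simp only [List.takeWhile_cons, List.dropWhile_cons, hbeq, Bool.false_eq_true, if_false,
            hP, hP', if_true, List.map_cons]
          rw [List.map_congr_left hmapeq, takeWhile_congr_mem _ _ _ hpred,
            faIdx_cons_ne _ _ _ _ ho, hj]
          simp
        · simp only [List.dropWhile_cons, hbeq, Bool.false_eq_true, if_false, hP, if_true, hP']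
          exact dropWhile_congr_mem _ _ _ hpred
      · -- head unplaceable: everything stays
        have hPf : (faIdx (c :: cs) (o - n)).isSome = false := by simpa using hP
        have hP' : (faIdx cs (o - (n + (if PySem.Str.isalpha c then 1 else 0)))).isSome = false := by
          rw [faIdx_cons_ne _ _ _ _ ho] at hPf
          simpa using hPf
        constructor
        · simp [hbeq, hPf, hP']
        · simp [hbeq, hPf, hP']

-- the main invariant: A's stream-merge from state (n, rem) on a sorted remainder equals
-- B's "resolve then assemble" view of the same remainder
theorem pvMain (s : List Char) (n : Int) (rem : List (Int × String))
    (hs : rem.Pairwise (fun a b => a.1 ≤ b.1)) :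
    pvA_loop s n rem
      = pvAsm s ((rem.takeWhile (fun p => (faIdx s (p.1 - n)).isSome)).map
          (fun p => ((faIdx s (p.1 - n)).getD 0, p.2)))
        ++ (rem.dropWhile (fun p => (faIdx s (p.1 - n)).isSome)).map (·.2) := by
  induction s generalizing n rem with
  | nil =>
    rw [show (fun p : Int × String => (faIdx [] (p.1 - n)).isSome) = (fun _ => false) from
      funext (fun p => rfl)]
    have h1 : rem.dropWhile (fun _ => false) = rem := by
      cases rem <;> simp [List.dropWhile]
    have h2 : rem.takeWhile (fun _ => false) = ([] : List (Int × String)) := by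
      cases rem <;> simp [List.takeWhile]
    rw [h1, h2]
    simp [pvA_loop, pvAsm]
  | cons c cs ih =>
    match rem with
    | [] =>
      rw [pvA_loop, pvA_while]
      simp only [List.takeWhile_nil, List.dropWhile_nil, List.map_nil, List.append_nil, pvAsm]
      rw [ih _ [] List.Pairwise.nil]
      simp
    | (o, p) :: tl =>
      by_cases hP : (faIdx (c :: cs) (o - n)).isSome = true
      · obtain ⟨hs1, hs2⟩ := pvSplit c cs n ((o, p) :: tl) hs
        rw [hs1, hs2, pvA_loop, pvA_while_spec]
        rw [pvAsm, List.filter_append, List.map_append, List.map_append]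
        have hz : List.filter (fun q => q.1 == 0) ((((o, p) :: tl).takeWhile (fun q => q.1 == n)).map (fun q => ((0 : Int), q.2)))
            = (((o, p) :: tl).takeWhile (fun q => q.1 == n)).map (fun q => ((0 : Int), q.2)) := by
          rw [List.filter_eq_self]
          intro a ha
          obtain ⟨x, _, rfl⟩ := List.mem_map.mp ha
          simp
        have hnz : List.filter (fun q => q.1 == 0) (((((o, p) :: tl).dropWhile (fun q => q.1 == n)).takeWhile
              (fun q => (faIdx cs (q.1 - (n + (if PySem.Str.isalpha c then 1 else 0)))).isSome)).map
              (fun q => ((faIdx cs (q.1 - (n + (if PySem.Str.isalpha c then 1 else 0)))).getD 0 + 1, q.2)))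
            = [] := by
          rw [List.filter_eq_nil_iff]
          intro a ha
          obtain ⟨x, hx, rfl⟩ := List.mem_map.mp ha
          have hxP := List.mem_takeWhile_imp hx
          obtain ⟨j, hj⟩ := Option.isSome_iff_exists.mp hxP
          have hj0 := faIdx_nonneg _ _ _ hj
          simp only [hj, Option.getD_some]
          simp
          omega
        rw [hz, hnz]
        have hneg : ((((o, p) :: tl).takeWhile (fun q => q.1 == n)).map (fun q => ((0 : Int), q.2))).map
            (fun q => (q.1 - 1, q.2)) = (((o, p) :: tl).takeWhile (fun q => q.1 == n)).map (fun q => ((-1 : Int), q.2)) := by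
          rw [List.map_map]
          rfl
        have hdec : (((((o, p) :: tl).dropWhile (fun q => q.1 == n)).takeWhile
              (fun q => (faIdx cs (q.1 - (n + (if PySem.Str.isalpha c then 1 else 0)))).isSome)).map
              (fun q => ((faIdx cs (q.1 - (n + (if PySem.Str.isalpha c then 1 else 0)))).getD 0 + 1, q.2))).map
              (fun q => (q.1 - 1, q.2))
            = ((((o, p) :: tl).dropWhile (fun q => q.1 == n)).takeWhile
              (fun q => (faIdx cs (q.1 - (n + (if PySem.Str.isalpha c then 1 else 0)))).isSome)).map
              (fun q => ((faIdx cs (q.1 - (n + (if PySem.Str.isalpha c then 1 else 0)))).getD 0, q.2)) := by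
          rw [List.map_map]
          apply List.map_congr_left
          intro x _
          simp
        rw [hneg, hdec, pvAsm_neg_prefix _ _ _ (by
          intro q hq
          obtain ⟨x, _, rfl⟩ := List.mem_map.mp hq
          omega)]
        rw [ih (n + (if PySem.Str.isalpha c then 1 else 0)) (((o, p) :: tl).dropWhile (fun q => q.1 == n))
          (hs.sublist (List.dropWhile_sublist _))]
        simp only [List.map_map]
        have hsnd : ((fun q : Int × String => ((0 : Int), q.2)) · |>.2) = (fun q : Int × String => q.2) := rfl
        simp [List.append_assoc, Function.comp_def]
      · have hPn : faIdx (c :: cs) (o - n) = none := by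
          cases hfa : faIdx (c :: cs) (o - n) <;> simp [hfa] at hP ⊢
        rw [pvA_loop_blocked _ _ _ _ _ hPn,
          List.takeWhile_cons_of_neg (by simpa using hP),
          List.dropWhile_cons_of_neg (by simpa using hP)]
        simp [pvAsm_nil_placed]

-- the dict/counter loop: lookups in first_at are exactly faIdx (shifted by start index/count)
theorem pvDict_get (s : List Char) (i0 c0 : Int) (d : PySem.Dict Int Int) (o : Int) :
    ((PySem.List.enumerate s i0).foldl
        (fun (st : PySem.Dict Int Int × Int) ic =>
          (st.1.setdefault st.2 ic.1, st.2 + (if PySem.Str.isalpha ic.2 then 1 else 0)))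
        (d, c0)).1.get? o
      = (d.get? o).or ((faIdx s (o - c0)).map (fun j => i0 + j)) := by
  induction s generalizing i0 c0 d with
  | nil => simp [PySem.List.enumerate_nil, faIdx]
  | cons c cs ih =>
    rw [PySem.List.enumerate_cons, List.foldl_cons, ih]
    by_cases ho : o = c0
    · subst ho
      have h0 : faIdx (c :: cs) (o - o) = some 0 := by
        rw [show o - o = 0 by ring, faIdx]
        simp
      rw [h0]
      by_cases hc : d.contains o = true
      · rw [PySem.Dict.setdefault_of_contains _ _ hc]
        have := PySem.Dict.contains_eq_isSome_get? d o
        obtain ⟨v, hv⟩ := Option.isSome_iff_exists.mp (by rw [← this]; exact hc)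
        simp [hv]
      · rw [PySem.Dict.setdefault_of_not_contains _ _ (by simpa using hc)]
        have hnone : d.get? o = none := by
          rw [PySem.Dict.get?_eq_none_iff_contains]
          simpa using hc
        rw [PySem.Dict.get?_insert_self, hnone]
        simp
    · have hd' : (d.setdefault c0 i0).get? o = d.get? o := by
        by_cases hc : d.contains c0 = true
        · rw [PySem.Dict.setdefault_of_contains _ _ hc]
        · rw [PySem.Dict.setdefault_of_not_contains _ _ (by simpa using hc),
            PySem.Dict.get?_insert_of_ne _ _ ho]
      rw [hd', faIdx_cons_ne _ _ _ _ ho]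
      congr 1
      cases hfa : faIdx cs (o - (c0 + (if PySem.Str.isalpha c then 1 else 0))) with
      | none => simp
      | some j => simp; omega

-- the placed/tail/blocked loop over the sorted profile, once blocked
theorem pvCut_true (fa : PySem.Dict Int Int) (sp : List (Int × String))
    (acc1 : List (Int × String)) (acc2 : List String) :
    sp.foldl (fun (st : List (Int × String) × List String × Bool) op =>
        if st.2.2 || !(fa.contains op.1) then (st.1, st.2.1 ++ [op.2], true)
        else (st.1 ++ [((fa.get? op.1).getD 0, op.2)], st.2.1, st.2.2)) (acc1, acc2, true)
      = (acc1, acc2 ++ sp.map (·.2), true) := by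
  induction sp generalizing acc2 with
  | nil => simp
  | cons hd tl ih =>
    rw [List.foldl_cons, if_pos (by simp), ih]
    simp

-- the placed/tail/blocked loop over the sorted profile, from an unblocked state
theorem pvCut_false (fa : PySem.Dict Int Int) (sp : List (Int × String))
    (acc1 : List (Int × String)) (acc2 : List String) :
    sp.foldl (fun (st : List (Int × String) × List String × Bool) op =>
        if st.2.2 || !(fa.contains op.1) then (st.1, st.2.1 ++ [op.2], true)
        else (st.1 ++ [((fa.get? op.1).getD 0, op.2)], st.2.1, st.2.2)) (acc1, acc2, false)
      = (acc1 ++ (sp.takeWhile (fun p => fa.contains p.1)).map (fun p => ((fa.get? p.1).getD 0, p.2)),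
         acc2 ++ (sp.dropWhile (fun p => fa.contains p.1)).map (·.2),
         !(sp.dropWhile (fun p => fa.contains p.1)).isEmpty) := by
  induction sp generalizing acc1 with
  | nil => simp
  | cons hd tl ih =>
    by_cases hc : fa.contains hd.1 = true
    · rw [List.foldl_cons, if_neg (by simp [hc]), ih,
        List.takeWhile_cons_of_pos (by simpa using hc), List.dropWhile_cons_of_pos (by simpa using hc)]
      simp
    · rw [List.foldl_cons, if_pos (by simp [hc]), pvCut_true,
        List.takeWhile_cons_of_neg (by simpa using hc), List.dropWhile_cons_of_neg (by simpa using hc)]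
      simp

-- the assembly loops: per-index bucket emission is pvAsm on indices shifted to start at i0
theorem pvAsmFold (placed : List (Int × String)) (L : List Char) (i0 : Int) (acc : List String) :
    (PySem.List.enumerate L i0).foldl
        (fun acc ic =>
          (placed.foldl (fun a q => if q.1 == ic.1 then a ++ [q.2] else a) acc) ++ [String.ofList [ic.2]])
        acc
      = acc ++ pvAsm L (placed.map (fun q => (q.1 - i0, q.2))) := by
  induction L generalizing i0 acc with
  | nil => simp [PySem.List.enumerate_nil, pvAsm]
  | cons c cs ih =>
    rw [PySem.List.enumerate_cons, List.foldl_cons, PySem.List.foldl_append_if, ih]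
    rw [pvAsm]
    have h1 : (placed.map (fun q => (q.1 - i0, q.2))).filter (fun q => q.1 == 0)
        = (placed.filter (fun q => q.1 == i0)).map (fun q => (q.1 - i0, q.2)) := by
      rw [List.filter_map]
      congr 1
      apply List.filter_congr
      intro x _
      simp only [Function.comp_apply]
      by_cases hx : x.1 = i0
      · simp [hx]
      · simp [hx]
        omega
    have h2 : (placed.map (fun q => (q.1 - i0, q.2))).map (fun q => (q.1 - 1, q.2))
        = placed.map (fun q => (q.1 - (i0 + 1), q.2)) := by
      rw [List.map_map]
      apply List.map_congr_left
      intro x _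
      simp only [Function.comp_apply]
      congr 1
      ring
    rw [h1, h2, List.map_map]
    simp [List.append_assoc, Function.comp_def]

-- ===== VERDICT (by name: the statement is the Claim_ definition above) =====
theorem apply_letter_punct_profile_spec : Claim_equal_apply_letter_punct_profile := by
  intro rc prof _
  unfold Spec_apply_letter_punct_profile
  by_cases hp : prof = []
  · rw [apply_letter_punct_profile, apply_letter_punct_profile_alt, if_pos hp, if_pos hp]
  · rw [apply_letter_punct_profile, apply_letter_punct_profile_alt, if_neg hp, if_neg hp]
    dsimp only
    rw [pvCut_false]
    dsimp only
    rw [pvAsmFold]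
    apply congrArg
    have hfaget : ∀ o : Int,
        ((PySem.List.enumerate rc.toList 0).foldl
            (fun (st : PySem.Dict Int Int × Int) ic =>
              (st.1.setdefault st.2 ic.1, st.2 + (if PySem.Str.isalpha ic.2 then 1 else 0)))
            (PySem.Dict.empty, 0)).1.get? o = faIdx rc.toList o := by
      intro o
      rw [pvDict_get]
      simp only [PySem.Dict.get?_empty, Option.none_or, sub_zero]
      cases hfa : faIdx rc.toList o <;> simp
    have hfacont : (fun p : Int × String =>
        ((PySem.List.enumerate rc.toList 0).foldl
            (fun (st : PySem.Dict Int Int × Int) ic =>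
              (st.1.setdefault st.2 ic.1, st.2 + (if PySem.Str.isalpha ic.2 then 1 else 0)))
            (PySem.Dict.empty, 0)).1.contains p.1)
        = (fun p : Int × String => (faIdx rc.toList (p.1 - 0)).isSome) := by
      funext p
      rw [PySem.Dict.contains_eq_isSome_get?, hfaget]
      simp
    have hfamap : (fun p : Int × String =>
        ((((PySem.List.enumerate rc.toList 0).foldl
            (fun (st : PySem.Dict Int Int × Int) ic =>
              (st.1.setdefault st.2 ic.1, st.2 + (if PySem.Str.isalpha ic.2 then 1 else 0)))
            (PySem.Dict.empty, 0)).1.get? p.1).getD 0, p.2))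
        = (fun p : Int × String => ((faIdx rc.toList (p.1 - 0)).getD 0, p.2)) := by
      funext p
      rw [hfaget]
      simp
    rw [hfacont, hfamap]
    rw [pvMain rc.toList 0 (PySem.List.sorted prof (fun x => x.1) false)
      (PySem.List.sorted_pairwise prof (fun x => x.1))]
    simp [List.map_map, Function.comp_def]
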